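-- pv_equiv track=rewrite | github.com/williamyen0623/Python | p05.py | p05
-- ===== SOURCE A (Python) =====
-- def p05(l1=[2,1], x=2):
--     output_list=None
--     # ↓程式區域↓
--     l2 = []
--     l3 = []
--     for i in range(0, len(l1)):
--         if(l1[i]<3):
--             l2.append(l1[i])
--         else:
--             l3.append(l1[i])
--     l2.sort()
--     output_list = l2 + l3
--     # ↑程式區域↑
--     return output_list
-- ===== SOURCE B (Python) =====
-- def p05(l1=[2,1], x=2):
--     return sorted(l1, key=lambda v: min(v, 3))
-- ===== Notes on version B (the rewrite author's own statement) =====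
-- stated objective: idiomatic
-- what changed: Replaced the index-loop partition + sort + concatenation with a single stable sorted() call keyed by min(v,3): all v>=3 tie on key 3 and keep their original order, while v<3 sort by value ahead of them.
import Mathlib
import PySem

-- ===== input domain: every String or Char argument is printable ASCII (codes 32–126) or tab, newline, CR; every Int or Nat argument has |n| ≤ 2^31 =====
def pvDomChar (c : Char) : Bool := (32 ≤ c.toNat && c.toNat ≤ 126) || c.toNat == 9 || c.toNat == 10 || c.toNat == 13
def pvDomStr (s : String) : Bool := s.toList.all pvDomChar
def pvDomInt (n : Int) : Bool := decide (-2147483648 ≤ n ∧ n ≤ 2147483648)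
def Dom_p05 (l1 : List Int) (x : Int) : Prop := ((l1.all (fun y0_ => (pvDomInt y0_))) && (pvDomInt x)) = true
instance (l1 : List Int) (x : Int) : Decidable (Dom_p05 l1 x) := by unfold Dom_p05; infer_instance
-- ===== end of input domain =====

-- B replaces A's index-loop partition + sort + concatenation with one stable sort keyed by min(v,3); objective: idiomatic.


-- ===== PORT A =====
-- for i in range(0, len(l1)): append l1[i] to l2 (if < 3) else l3; l1[i] is always
-- in range here, so pyGetD with default 0 is exact.  l2.sort() (stable, key = id),
-- then l2 + l3.  (A sorts only the local list l2; no argument is mutated.)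
def p05 (l1 : List Int) (x : Int) : List Int :=
  let p : List Int × List Int :=
    (PySem.List.pyRange 0 (PySem.List.len l1)).foldl
      (fun acc i =>
        if PySem.List.pyGetD l1 i 0 < 3 then (acc.1 ++ [PySem.List.pyGetD l1 i 0], acc.2)
        else (acc.1, acc.2 ++ [PySem.List.pyGetD l1 i 0]))
      ([], [])
  PySem.List.sorted p.1 (fun y => y) false ++ p.2

-- ===== PORT B =====
-- return sorted(l1, key=lambda v: min(v, 3))
def p05_alt (l1 : List Int) (x : Int) : List Int :=
  PySem.List.sorted l1 (fun v => min v 3) false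

-- ===== PRECONDITION & SPEC =====
def Spec_p05 (l1 : List Int) (x : Int) (out : List Int) : Prop := out = p05_alt l1 x
instance (l1 : List Int) (x : Int) (out : List Int) : Decidable (Spec_p05 l1 x out) := by unfold Spec_p05; infer_instance

-- ===== CLAIM (what is proved, stated in full; the proofs are below) =====
def Claim_equal_p05 : Prop := ∀ (l1 : List Int) (x : Int), Dom_p05 l1 x → Spec_p05 l1 x (p05 l1 x)

-- ===== LEMMAS AND PROOFS =====

-- insertion lands inside the left part when every right-part element sorts after x
theorem insertBy_append_left (before : Int → Int → Bool) (v : Int) (S L : List Int)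
    (hL : ∀ b ∈ L, before v b = true) :
    PySem.List.insertBy before v (S ++ L) = PySem.List.insertBy before v S ++ L := by
  induction S with
  | nil =>
    cases L with
    | nil => simp [PySem.List.insertBy]
    | cons b L' => simp [PySem.List.insertBy, hL b (by simp)]
  | cons y S' ih =>
    by_cases h : before v y = true <;> simp [PySem.List.insertBy, h, ih]

-- insertBy only compares v with the members of the list
theorem insertBy_congr (p q : Int → Int → Bool) (v : Int) (S : List Int)
    (h : ∀ a ∈ S, p v a = q v a) :
    PySem.List.insertBy p v S = PySem.List.insertBy q v S := by
  induction S with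
  | nil => rfl
  | cons y S' ih =>
    have hy := h y (by simp)
    by_cases hp : p v y = true <;>
      simp [PySem.List.insertBy, hp, hy ▸ hp,
        ih (fun a ha => h a (by simp [ha]))]

-- the two step functions
def bkStep (acc : List Int) (v : Int) : List Int :=
  PySem.List.insertBy (fun a b => decide (min a 3 < min b 3)) v acc
def idStep (acc : List Int) (v : Int) : List Int :=
  PySem.List.insertBy (fun a b => decide (a < b)) v acc

-- main invariant: folding B's insertion over l starting from S ++ L (S the sorted
-- <3 part so far, L the ≥3 part so far) produces the partition-then-sort shape
theorem main_inv (l : List Int) (S L : List Int)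
    (hS : ∀ a ∈ S, a < 3) (hL : ∀ b ∈ L, 3 ≤ b) :
    l.foldl bkStep (S ++ L)
      = (l.filter (fun v => decide (v < 3))).foldl idStep S
          ++ L ++ l.filter (fun v => decide (¬ v < 3)) := by
  induction l generalizing S L with
  | nil => simp
  | cons v l' ih =>
    by_cases hv : v < 3
    · have h1 : bkStep (S ++ L) v = idStep S v ++ L := by
        unfold bkStep
        rw [insertBy_append_left _ _ _ _
            (fun b hb => by have := hL b hb; simp; omega)]
        unfold idStep
        rw [insertBy_congr _ (fun a b => decide (a < b)) v S
            (fun a ha => by have := hS a ha; rw [decide_eq_decide]; omega)]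
      have hS' : ∀ a ∈ idStep S v, a < 3 := by
        intro a ha
        unfold idStep at ha
        rcases (PySem.List.mem_insertBy _ _ _ _).1 ha with h | h
        · omega
        · exact hS a h
      simp only [List.foldl_cons, h1, ih _ _ hS' hL, List.filter_cons]
      simp [hv]
    · have h1 : bkStep (S ++ L) v = S ++ (L ++ [v]) := by
        unfold bkStep
        rw [PySem.List.insertBy_of_forall_not_before _ _ _
            (fun c hc => by simp; omega), List.append_assoc]
      have hL' : ∀ b ∈ L ++ [v], 3 ≤ b := by
        intro b hb
        rcases List.mem_append.1 hb with h | h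
        · exact hL b h
        · simp at h; omega
      simp only [List.foldl_cons, h1, ih _ _ hS hL', List.filter_cons]
      simp [hv, List.append_assoc]

-- A's partition loop computes the two filters
theorem partition_foldl (l : List Int) (S L : List Int) :
    l.foldl
      (fun (acc : List Int × List Int) v =>
        if v < 3 then (acc.1 ++ [v], acc.2) else (acc.1, acc.2 ++ [v])) (S, L)
      = (S ++ l.filter (fun v => decide (v < 3)),
         L ++ l.filter (fun v => decide (¬ v < 3))) := by
  induction l generalizing S L with
  | nil => simp
  | cons v l' ih =>
    by_cases hv : v < 3 <;> simp [hv, ih, List.filter_cons]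

-- ===== VERDICT (by name: the statement is the Claim_ definition above) =====
theorem p05_spec : Claim_equal_p05 := by
  intro l1 x _
  unfold Spec_p05 p05 p05_alt
  rw [PySem.List.foldl_pyRange_pyGetD l1 0
        (fun (acc : List Int × List Int) v =>
          if v < 3 then (acc.1 ++ [v], acc.2) else (acc.1, acc.2 ++ [v]))
        ([], []) (by norm_num)]
  simp only [Int.toNat_zero, List.drop_zero, partition_foldl, List.nil_append]
  rw [PySem.List.sorted_eq_foldl_insertBy, PySem.List.sorted_eq_foldl_insertBy]
  have h := main_inv l1 [] [] (by simp) (by simp)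
  unfold bkStep idStep at h
  simpa using h.symm
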